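-- pv_equiv track=rewrite | github.com/beautifulmachines/gpkit-core | gpkit/util/repr_conventions.py | latexify
-- ===== SOURCE A (Python) =====
-- _GREEK = {
--     "alpha": r"\alpha",
--     "beta": r"\beta",
--     "gamma": r"\gamma",
--     "delta": r"\delta",
--     "epsilon": r"\epsilon",
--     "eta": r"\eta",
--     "theta": r"\theta",
--     "lambda": r"\lambda",
--     "mu": r"\mu",
--     "nu": r"\nu",
--     "xi": r"\xi",
--     "pi": r"\pi",
--     "rho": r"\rho",
--     "sigma": r"\sigma",
--     "tau": r"\tau",
--     "phi": r"\phi",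
--     "chi": r"\chi",
--     "psi": r"\psi",
--     "omega": r"\omega",
--     "zeta": r"\zeta",
--     "kappa": r"\kappa",
--     "inf": r"\infty",
--     "infty": r"\infty",
--     # Uppercase
--     "Gamma": r"\Gamma",
--     "Delta": r"\Delta",
--     "Theta": r"\Theta",
--     "Lambda": r"\Lambda",
--     "Xi": r"\Xi",
--     "Pi": r"\Pi",
--     "Sigma": r"\Sigma",
--     "Phi": r"\Phi",
--     "Psi": r"\Psi",
--     "Omega": r"\Omega",
-- }
--
-- def latexify(name: str) -> str:
--     """Convert a variable name to a LaTeX base string.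
--
--     - Pure Greek: 'rho' -> r'\\rho'
--     - Underscore split: 'm_wet' -> r'm_{\\text{wet}}'
--     - Greek + underscore: 'rho_inf' -> r'\\rho_{\\infty}'
--     - Already escaped (starts with '\\'): return as-is
--     """
--     if name.startswith("\\"):
--         return name  # already LaTeX — do not double-convert
--     if "_" in name:
--         parts = name.split("_", 1)
--         base = _GREEK.get(parts[0], parts[0])
--         if "_" in parts[1] or parts[1] in _GREEK:
--             sub = latexify(parts[1])  # nested/Greek → already math, no \text{}
--         else:
--             sub = r"\text{" + parts[1] + "}"
--         return base + "_{" + sub + "}"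
--     return _GREEK.get(name, name)
-- ===== SOURCE B (Python) =====
-- _GREEK = {
--     "alpha": r"\alpha", "beta": r"\beta", "gamma": r"\gamma", "delta": r"\delta",
--     "epsilon": r"\epsilon", "eta": r"\eta", "theta": r"\theta", "lambda": r"\lambda",
--     "mu": r"\mu", "nu": r"\nu", "xi": r"\xi", "pi": r"\pi", "rho": r"\rho",
--     "sigma": r"\sigma", "tau": r"\tau", "phi": r"\phi", "chi": r"\chi",
--     "psi": r"\psi", "omega": r"\omega", "zeta": r"\zeta", "kappa": r"\kappa",
--     "inf": r"\infty", "infty": r"\infty",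
--     "Gamma": r"\Gamma", "Delta": r"\Delta", "Theta": r"\Theta", "Lambda": r"\Lambda",
--     "Xi": r"\Xi", "Pi": r"\Pi", "Sigma": r"\Sigma", "Phi": r"\Phi",
--     "Psi": r"\Psi", "Omega": r"\Omega",
-- }
--
--
-- def latexify(name: str) -> str:
--     """Iterative version: peel subscript heads into `bases`, then wrap back up."""
--     bases = []
--     rest = name
--     while True:
--         if rest.startswith("\\"):
--             inner = rest
--             break
--         if "_" in rest:
--             head, tail = rest.split("_", 1)
--             bases.append(_GREEK.get(head, head))
--             if "_" in tail or tail in _GREEK: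
--                 rest = tail
--                 continue
--             inner = r"\text{" + tail + "}"
--             break
--         inner = _GREEK.get(rest, rest)
--         break
--     for b in reversed(bases):
--         inner = b + "_{" + inner + "}"
--     return inner
-- ===== Notes on version B (the rewrite author's own statement) =====
-- stated objective: alternative
-- what changed: Replaces A's self-recursion with an iterative peel loop that accumulates the outer bases in a list and a final right-to-left fold that re-wraps them around the innermost piece.
import Mathlib
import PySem

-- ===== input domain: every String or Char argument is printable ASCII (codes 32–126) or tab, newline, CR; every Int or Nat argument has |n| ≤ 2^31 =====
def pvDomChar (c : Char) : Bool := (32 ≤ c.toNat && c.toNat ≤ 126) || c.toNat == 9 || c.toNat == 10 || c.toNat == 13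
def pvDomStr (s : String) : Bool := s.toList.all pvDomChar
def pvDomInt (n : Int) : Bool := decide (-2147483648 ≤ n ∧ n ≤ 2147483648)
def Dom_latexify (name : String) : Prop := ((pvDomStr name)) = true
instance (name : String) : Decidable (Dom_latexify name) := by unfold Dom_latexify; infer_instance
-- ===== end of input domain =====

-- B replaces A's recursion by an iterative peel loop plus a final right-to-left wrap fold (objective: alternative decomposition; same return value).

-- the _GREEK module constant (shared verbatim by both Pythons)
def pvGreek : PySem.Dict (List Char) (List Char) := PySem.Dict.ofList [
  ("alpha".toList, "\\alpha".toList), ("beta".toList, "\\beta".toList),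
  ("gamma".toList, "\\gamma".toList), ("delta".toList, "\\delta".toList),
  ("epsilon".toList, "\\epsilon".toList), ("eta".toList, "\\eta".toList),
  ("theta".toList, "\\theta".toList), ("lambda".toList, "\\lambda".toList),
  ("mu".toList, "\\mu".toList), ("nu".toList, "\\nu".toList),
  ("xi".toList, "\\xi".toList), ("pi".toList, "\\pi".toList),
  ("rho".toList, "\\rho".toList), ("sigma".toList, "\\sigma".toList),
  ("tau".toList, "\\tau".toList), ("phi".toList, "\\phi".toList),
  ("chi".toList, "\\chi".toList), ("psi".toList, "\\psi".toList),
  ("omega".toList, "\\omega".toList), ("zeta".toList, "\\zeta".toList),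
  ("kappa".toList, "\\kappa".toList), ("inf".toList, "\\infty".toList),
  ("infty".toList, "\\infty".toList),
  ("Gamma".toList, "\\Gamma".toList), ("Delta".toList, "\\Delta".toList),
  ("Theta".toList, "\\Theta".toList), ("Lambda".toList, "\\Lambda".toList),
  ("Xi".toList, "\\Xi".toList), ("Pi".toList, "\\Pi".toList),
  ("Sigma".toList, "\\Sigma".toList), ("Phi".toList, "\\Phi".toList),
  ("Psi".toList, "\\Psi".toList), ("Omega".toList, "\\Omega".toList)]

-- ===== PORT A =====
-- recursion on the character list; under the guard '_' in s, s.split("_", 1) is exactly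
-- (the prefix before the first '_', the suffix after it) — ported by hand as takeWhile/drop
def latexifyCore (s : List Char) : List Char :=
  if PySem.Chars.startswith s ['\\'] then s
  else if h2 : PySem.Chars.isIn ['_'] s then
    let p0 := s.takeWhile (fun x => !decide (x = '_'))
    let p1 := s.drop (p0.length + 1)
    let base := pvGreek.getD p0 p0
    let sub := if PySem.Chars.isIn ['_'] p1 || pvGreek.contains p1
               then latexifyCore p1
               else "\\text{".toList ++ p1 ++ ['}']
    base ++ "_{".toList ++ sub ++ ['}']
  else pvGreek.getD s s
termination_by s.length
decreasing_by
  have hne : s ≠ [] := by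
    intro hs; subst hs; exact absurd h2 (by decide)
  have hp : 0 < s.length := List.length_pos_of_ne_nil hne
  simp only [List.length_drop]
  omega

def latexify (name : String) : String := String.ofList (latexifyCore name.toList)

-- ===== PORT B =====
-- the while-loop of Source B: accumulate `bases`, return (bases, inner) when the loop breaks
def latexifyAltLoop (bases : List (List Char)) (rest : List Char) :
    List (List Char) × List Char :=
  if PySem.Chars.startswith rest ['\\'] then (bases, rest)
  else if h2 : PySem.Chars.isIn ['_'] rest then
    let head := rest.takeWhile (fun x => !decide (x = '_'))
    let tail := rest.drop (head.length + 1)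
    let bases' := bases ++ [pvGreek.getD head head]
    if PySem.Chars.isIn ['_'] tail || pvGreek.contains tail
    then latexifyAltLoop bases' tail
    else (bases', "\\text{".toList ++ tail ++ ['}'])
  else (bases, pvGreek.getD rest rest)
termination_by rest.length
decreasing_by
  have hne : rest ≠ [] := by
    intro hs; subst hs; exact absurd h2 (by decide)
  have hp : 0 < rest.length := List.length_pos_of_ne_nil hne
  simp only [List.length_drop]
  omega

-- 'for b in reversed(bases): inner = b + "_{" + inner + "}"' is a right fold over bases
def latexify_alt (name : String) : String :=
  String.ofList ((latexifyAltLoop [] name.toList).1.foldr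
    (fun b acc => b ++ "_{".toList ++ acc ++ ['}'])
    (latexifyAltLoop [] name.toList).2)

-- ===== PRECONDITION & SPEC =====
def Spec_latexify (name : String) (out : String) : Prop := out = latexify_alt name
instance (name : String) (out : String) : Decidable (Spec_latexify name out) := by unfold Spec_latexify; infer_instance

-- ===== CLAIM (what is proved, stated in full; the proofs are below) =====
def Claim_equal_latexify : Prop := ∀ (name : String), Dom_latexify name → Spec_latexify name (latexify name)

-- ===== LEMMAS AND PROOFS =====

-- loop invariant: folding the wraps over the accumulated bases reproduces A's recursion
theorem latexifyAltLoop_foldr (bases : List (List Char)) (rest : List Char) :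
    (latexifyAltLoop bases rest).1.foldr
        (fun b acc => b ++ "_{".toList ++ acc ++ ['}'])
        (latexifyAltLoop bases rest).2
      = bases.foldr (fun b acc => b ++ "_{".toList ++ acc ++ ['}'])
          (latexifyCore rest) := by
  fun_induction latexifyAltLoop bases rest with
  | case1 bases rest h1 =>
    rw [latexifyCore]
    simp [h1]
  | case2 bases rest h1 h2 head tail bases' h3 ih =>
    rw [latexifyCore]
    simp only [h1, h2, Bool.false_eq_true, if_false, dif_pos]
    rw [ih]
    simp only [bases', List.foldr_append]
    rw [if_pos (by simpa using h3)]
    simp [head, tail]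
  | case3 bases rest h1 h2 head tail bases' h3 =>
    rw [latexifyCore]
    simp only [h1, h2, Bool.false_eq_true, if_false, dif_pos]
    rw [if_neg (by simpa using h3)]
    simp only [bases', List.foldr_append]
    simp [head, tail]
  | case4 bases rest h1 h2 =>
    rw [latexifyCore]
    simp [h1, h2]

-- ===== VERDICT (by name: the statement is the Claim_ definition above) =====
theorem latexify_spec : Claim_equal_latexify := by
  intro name _
  unfold Spec_latexify latexify latexify_alt
  rw [latexifyAltLoop_foldr]
  rfl
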